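-- pv_equiv track=rewrite | github.com/HuanPm/mlp_assignment4 | preprocess_data.py | auc_split
-- ===== SOURCE A (Python) =====
-- def auc_onehot_openpass(auc):
--     process_len = min(3,len(auc))
--     open_pass = '0'*3
--     openpass_len = 0
--     for i in range(process_len):
--         if auc[i] == 'Pass':
--             open_pass = open_pass[:i]+'1'+open_pass[i+1:]
--             openpass_len = i
--         else:
--             openpass_len = i
--             break
--     return open_pass,openpass_len
--
-- def auc_split(auc):
--     _,openpass_len = auc_onehot_openpass(auc)
--
--     auc_cut = auc[openpass_len:]
--     auc_cut_len = len(auc_cut)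
--     split = []
--     start = 0
--     for i in range(1,auc_cut_len):
--         if auc_cut[i][0].isdigit():
--             split.append(list(auc_cut[start:i]))
--             start = i
--     if auc_cut[start:] != []:
--         split.append(auc_cut[start:])
--     return split
-- ===== SOURCE B (Python) =====
-- def auc_split(auc):
--     # openpass_len: first index among the first min(3, len) elements that is not 'Pass',
--     # else the last examined index (0 for empty input)
--     k = 0
--     for i in range(min(3, len(auc))):
--         k = i
--         if auc[i] != 'Pass':
--             break
--     cut = auc[k:]
--     if not cut:
--         return []
--     groups = []
--     current = [cut[0]]
--     for elem in cut[1:]: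
--         if elem[0].isdigit():
--             groups.append(current)
--             current = [elem]
--         else:
--             current.append(elem)
--     groups.append(current)
--     return groups
-- ===== Notes on version B (the rewrite author's own statement) =====
-- stated objective: alternative
-- what changed: B drops A's onehot-string bookkeeping and A's start-index/slice splitting, instead building the groups incrementally in one pass (append to the current group, or close it when an element starts with a digit).
import Mathlib
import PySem

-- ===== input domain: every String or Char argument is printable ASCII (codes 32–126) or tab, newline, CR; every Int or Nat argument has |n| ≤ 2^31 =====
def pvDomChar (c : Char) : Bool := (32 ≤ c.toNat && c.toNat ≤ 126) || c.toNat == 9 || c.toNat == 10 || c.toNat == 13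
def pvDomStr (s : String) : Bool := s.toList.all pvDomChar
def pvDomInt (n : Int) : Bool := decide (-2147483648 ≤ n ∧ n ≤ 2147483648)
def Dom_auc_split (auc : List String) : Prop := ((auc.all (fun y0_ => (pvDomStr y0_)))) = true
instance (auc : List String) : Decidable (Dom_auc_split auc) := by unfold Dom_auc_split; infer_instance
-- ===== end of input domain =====

-- B replaces A's index/slice bookkeeping by incremental group building (one pass over
-- elements, no slicing); objective: alternative decomposition, not claimed faster.

-- shared helper: elem[0].isdigit() read on an Option head (none = empty string, where Python raises)
def pvDigitHead (s : String) : Bool :=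
  match PySem.Str.pyGet? s 0 with
  | some c => PySem.Str.isdigit c
  | none => false

-- ===== PORT A =====
-- loop of auc_onehot_openpass: state (open_pass as List Char, openpass_len); break = return
def aucOnehotLoop (auc : List String) : (List Char × Int) → List Int → (List Char × Int)
  | st, [] => st
  | (op, _), i :: rest =>
      if (PySem.List.pyGet? auc i).getD "" == "Pass" then
        aucOnehotLoop auc
          (PySem.Chars.slice op none (some i) ++ ['1'] ++ PySem.Chars.slice op (some (i+1)) none, i) rest
      else (op, i)

def auc_onehot_openpass (auc : List String) : String × Int :=
  let process_len : Int := min 3 (auc.length : Int)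
  let r := aucOnehotLoop auc ("000".toList, 0) (PySem.List.pyRange 0 process_len)
  (String.ofList r.1, r.2)

-- loop of auc_split: state (split, start)
def aucSplitLoop (cut : List String) : (List (List String) × Int) → List Int → (List (List String) × Int)
  | st, [] => st
  | (split, start), i :: rest =>
      if pvDigitHead ((PySem.List.pyGet? cut i).getD "") then
        aucSplitLoop cut (split ++ [PySem.List.slice cut (some start) (some i)], i) rest
      else
        aucSplitLoop cut (split, start) rest

def auc_split (auc : List String) : List (List String) :=
  let openpass_len := (auc_onehot_openpass auc).2
  let auc_cut := PySem.List.slice auc (some openpass_len) none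
  let auc_cut_len : Int := (auc_cut.length : Int)
  let r := aucSplitLoop auc_cut ([], 0) (PySem.List.pyRange 1 auc_cut_len)
  if PySem.List.slice auc_cut (some r.2) none ≠ [] then
    r.1 ++ [PySem.List.slice auc_cut (some r.2) none]
  else r.1

-- ===== PORT B =====
-- Source B's first loop: k = i; break when auc[i] != 'Pass'
def bOpenLoop (auc : List String) : Int → List Int → Int
  | k, [] => k
  | _, i :: rest =>
      if (PySem.List.pyGet? auc i).getD "" ≠ "Pass" then i
      else bOpenLoop auc i rest

-- Source B's grouping loop over the elements of cut[1:]
def bGroupLoop (groups : List (List String)) (current : List String) : List String → List (List String)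
  | [] => groups ++ [current]
  | e :: rest =>
      if pvDigitHead e then bGroupLoop (groups ++ [current]) [e] rest
      else bGroupLoop groups (current ++ [e]) rest

def auc_split_alt (auc : List String) : List (List String) :=
  let k := bOpenLoop auc 0 (PySem.List.pyRange 0 (min 3 (auc.length : Int)))
  let cut := PySem.List.slice auc (some k) none
  match cut with
  | [] => []
  | c0 :: rest => bGroupLoop [] [c0] rest

-- ===== PRECONDITION & SPEC =====
-- closed-form value of openpass_len, readable off the first three elements
def pvOpenLen (auc : List String) : Nat :=
  match auc with
  | [] => 0
  | [_] => 0
  | a :: b :: rest =>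
      if a ≠ "Pass" then 0
      else if rest = [] then 1
      else if b ≠ "Pass" then 1 else 2

-- Pre_ excludes exactly the inputs on which Python A raises IndexError: an empty string
-- among the elements after the first one of auc[openpass_len:] ('' [0] raises).
def Pre_auc_split (auc : List String) : Prop :=
  ∀ s ∈ (auc.drop (pvOpenLen auc)).drop 1, s ≠ ""
instance (auc : List String) : Decidable (Pre_auc_split auc) := by unfold Pre_auc_split; infer_instance

def pvWitness_auc_split : List String := ["Pass", "1S", "Pass", "2H"]

def Spec_auc_split (auc : List String) (out : List (List String)) : Prop := out = auc_split_alt auc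
instance (auc : List String) (out : List (List String)) : Decidable (Spec_auc_split auc out) := by unfold Spec_auc_split; infer_instance

-- ===== CLAIM (what is proved, stated in full; the proofs are below) =====
def Claim_equal_auc_split : Prop := ∀ (auc : List String), Dom_auc_split auc → Pre_auc_split auc → Spec_auc_split auc (auc_split auc)

-- ===== LEMMAS AND PROOFS =====

theorem pyGet?_cons_one {α : Type} (a b : α) (l : List α) :
    PySem.List.pyGet? (a :: b :: l) 1 = some b := by
  simp

theorem pyGet?_cons_two {α : Type} (a b c : α) (l : List α) :
    PySem.List.pyGet? (a :: b :: c :: l) 2 = some c := by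
  simpa using PySem.List.pyGet?_natCast (a :: b :: c :: l) 2

-- both ports' openpass_len equals the closed form
theorem aOpen_eq (auc : List String) : (auc_onehot_openpass auc).2 = (pvOpenLen auc : Int) := by
  match auc with
  | [] => rfl
  | [a] =>
      by_cases ha : a = "Pass" <;>
        simp [auc_onehot_openpass, pvOpenLen, aucOnehotLoop, ha, show PySem.List.pyRange 0 1 = [0] from by decide]
  | [a, b] =>
      by_cases ha : a = "Pass" <;> by_cases hb : b = "Pass" <;>
        simp [auc_onehot_openpass, pvOpenLen, aucOnehotLoop, ha, hb, show PySem.List.pyRange 0 2 = [0, 1] from by decide]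
  | a :: b :: c :: rest =>
      by_cases ha : a = "Pass" <;> by_cases hb : b = "Pass" <;> by_cases hc : c = "Pass" <;>
        simp [auc_onehot_openpass, pvOpenLen, aucOnehotLoop, ha, hb, hc, pyGet?_cons_one, pyGet?_cons_two, show min 3 ((rest.length : Int) + 1 + 1 + 1) = 3 from by omega,
          show PySem.List.pyRange 0 3 = [0, 1, 2] from by decide]

theorem bOpen_eq (auc : List String) :
    bOpenLoop auc 0 (PySem.List.pyRange 0 (min 3 (auc.length : Int))) = (pvOpenLen auc : Int) := by
  match auc with
  | [] => rfl
  | [a] =>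
      by_cases ha : a = "Pass" <;> simp [bOpenLoop, pvOpenLen, ha, show PySem.List.pyRange 0 1 = [0] from by decide]
  | [a, b] =>
      by_cases ha : a = "Pass" <;> by_cases hb : b = "Pass" <;>
        simp [bOpenLoop, pvOpenLen, ha, hb, show PySem.List.pyRange 0 2 = [0, 1] from by decide]
  | a :: b :: c :: rest =>
      by_cases ha : a = "Pass" <;> by_cases hb : b = "Pass" <;> by_cases hc : c = "Pass" <;>
        simp [bOpenLoop, pvOpenLen, ha, hb, hc, pyGet?_cons_one, pyGet?_cons_two, show min 3 ((rest.length : Int) + 1 + 1 + 1) = 3 from by omega,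
          show PySem.List.pyRange 0 3 = [0, 1, 2] from by decide]

-- main invariant: A's index/slice loop plus its final slice-append equals B's incremental grouping
theorem loop_inv (cut : List String) (n : Nat) (j start : Nat) (hs : start < j)
    (hj : j + n = cut.length) (split : List (List String)) :
    (if PySem.List.slice cut
          (some (aucSplitLoop cut (split, (start : Int)) (PySem.List.pyRange (j : Int) (cut.length : Int))).2) none ≠ [] then
       (aucSplitLoop cut (split, (start : Int)) (PySem.List.pyRange (j : Int) (cut.length : Int))).1 ++
         [PySem.List.slice cut
           (some (aucSplitLoop cut (split, (start : Int)) (PySem.List.pyRange (j : Int) (cut.length : Int))).2) none]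
     else (aucSplitLoop cut (split, (start : Int)) (PySem.List.pyRange (j : Int) (cut.length : Int))).1)
    = bGroupLoop split ((cut.drop start).take (j - start)) (cut.drop j) := by
  induction n generalizing j start split with
  | zero =>
      have hj' : j = cut.length := by omega
      subst hj'
      have hr : PySem.List.pyRange (cut.length : Int) (cut.length : Int) = [] := by
        simp [PySem.List.pyRange]
      have hne : cut.drop start ≠ [] := by
        intro h
        have := List.drop_eq_nil_iff.mp h
        omega
      have htake : (cut.drop start).take (cut.length - start) = cut.drop start := by
        apply List.take_of_length_le; simp
      simp only [hr, aucSplitLoop, List.drop_length, bGroupLoop, htake]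
      rw [PySem.List.slice_from cut (by positivity), Int.toNat_natCast]
      simp [hne]
  | succ n ih =>
      have hlt : j < cut.length := by omega
      rw [show ((j : Nat) : Int) = (j : Int) from rfl,
          PySem.List.pyRange_one_cons (by exact_mod_cast hlt)]
      have hget : PySem.List.pyGet? cut (j : Int) = some cut[j] := by
        rw [PySem.List.pyGet?_natCast]
        exact List.getElem?_eq_getElem hlt
      have hdrop : cut.drop j = cut[j] :: cut.drop (j + 1) := List.drop_eq_getElem_cons hlt
      have hcast : ((j : Int) + 1) = ((j + 1 : Nat) : Int) := by push_cast; ring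
      by_cases hdig : pvDigitHead cut[j]
      · simp only [aucSplitLoop, hget, Option.getD_some, hdig, if_true, hcast]
        rw [ih (j + 1) j (by omega) (by omega)
          (split ++ [PySem.List.slice cut (some (start : Int)) (some (j : Int))])]
        rw [PySem.List.slice_natCast, hdrop]
        simp only [bGroupLoop, hdig, if_true]
        simp [show j + 1 - j = 1 from by omega, List.take_one, List.head?_drop,
          List.getElem?_eq_getElem hlt]
      · simp only [aucSplitLoop, hget, Option.getD_some, if_neg hdig, hcast]
        rw [ih (j + 1) start (by omega) (by omega) split]
        have h2 : (cut.drop start).take (j + 1 - start) =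
            (cut.drop start).take (j - start) ++ [cut[j]] := by
          rw [show j + 1 - start = (j - start) + 1 from by omega, List.take_add_one]
          have hq : (cut.drop start)[j - start]? = some cut[j] := by
            rw [List.getElem?_drop, show start + (j - start) = j from by omega]
            exact List.getElem?_eq_getElem hlt
          simp [hq]
        rw [hdrop]
        simp [bGroupLoop, hdig, h2]

-- ===== VERDICT (by name: the statement is the Claim_ definition above) =====
theorem auc_split_spec : Claim_equal_auc_split := by
  unfold Claim_equal_auc_split
  intro auc _ _
  unfold Spec_auc_split
  simp only [auc_split, auc_split_alt, aOpen_eq, bOpen_eq]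
  rw [PySem.List.slice_from auc (by positivity), Int.toNat_natCast]
  cases hcut : auc.drop (pvOpenLen auc) with
  | nil =>
      simp [aucSplitLoop, PySem.List.slice, show PySem.List.pyRange 1 0 = [] from by decide]
  | cons c0 rest =>
      have key := loop_inv (c0 :: rest) ((c0 :: rest).length - 1) 1 0 (by omega)
        (by simp; omega) []
      simp only [Nat.cast_one, Nat.cast_zero] at key
      rw [key]
      simp
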